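-- pv_equiv track=rewrite | github.com/brettlungal/spongebob-mocking-case | mock.py | convertToMockingCase
-- ===== SOURCE A (Python) =====
-- def convertToMockingCase(charArray, startUpper):
--     flop = startUpper
--     for index,letter in enumerate(charArray):
--         if letter != " ":
--             if flop:
--                 charArray[index] = letter.upper()
--             flop = not flop
--
--     return "".join(charArray)
-- ===== SOURCE B (Python) =====
-- def convertToMockingCase(charArray, startUpper):
--     positions = [i for i, c in enumerate(charArray) if c != " "]
--     chosen = set(positions[0::2] if startUpper else positions[1::2])
--     return "".join(c.upper() if i in chosen else c for i, c in enumerate(charArray))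
-- ===== Notes on version B (the rewrite author's own statement) =====
-- stated objective: alternative
-- what changed: Replaces A's running boolean toggle with in-place index assignment by a two-pass scheme: first collect the indices of non-space entries, then uppercase exactly the even-rank (or odd-rank, per startUpper) half of them chosen by a stride-2 slice, joining a freshly built sequence without mutating the input.
import Mathlib
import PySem

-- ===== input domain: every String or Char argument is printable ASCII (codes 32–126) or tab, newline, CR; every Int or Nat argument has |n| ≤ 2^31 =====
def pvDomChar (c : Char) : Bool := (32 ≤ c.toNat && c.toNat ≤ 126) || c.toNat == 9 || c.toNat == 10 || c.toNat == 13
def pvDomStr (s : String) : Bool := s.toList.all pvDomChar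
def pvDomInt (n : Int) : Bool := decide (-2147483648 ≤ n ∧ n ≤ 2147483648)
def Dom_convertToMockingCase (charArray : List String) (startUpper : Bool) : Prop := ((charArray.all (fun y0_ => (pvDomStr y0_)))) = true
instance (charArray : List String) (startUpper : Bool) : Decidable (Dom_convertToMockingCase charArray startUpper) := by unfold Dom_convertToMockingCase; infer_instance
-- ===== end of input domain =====

-- B replaces A's running toggle + in-place assignment with a two-pass position/stride-2 scheme;
-- A mutates charArray in place, B does not: the equivalence proved is about the return value only.


-- ===== PORT A =====
-- the for-loop over enumerate(charArray): at each step the assignment charArray[index] = …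
-- rewrites exactly the element being visited, so the loop is the obvious structural recursion
def loopA : List String → Bool → List String
  | [], _ => []
  | letter :: rest, flop =>
    if letter ≠ " " then
      (if flop then PySem.Str.upper letter else letter) :: loopA rest (!flop)
    else
      letter :: loopA rest flop

def convertToMockingCase (charArray : List String) (startUpper : Bool) : String :=
  PySem.Str.join "" (loopA charArray startUpper)

-- ===== PORT B =====
-- positions[0::2] / positions[1::2]: stride-2 slice of a list (exact for these two slices)
def everyOther : List Int → List Int
  | [] => []
  | [x] => [x]
  | x :: _ :: xs => x :: everyOther xs

def convertToMockingCase_alt (charArray : List String) (startUpper : Bool) : String :=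
  let positions := ((PySem.List.enumerate charArray).filter (fun p => p.2 ≠ " ")).map (fun p => p.1)
  let chosen := PySem.Set.ofList (if startUpper then everyOther positions else everyOther positions.tail)
  PySem.Str.join "" ((PySem.List.enumerate charArray).map
    (fun p => if p.1 ∈ chosen then PySem.Str.upper p.2 else p.2))

-- ===== PRECONDITION & SPEC =====
def Spec_convertToMockingCase (charArray : List String) (startUpper : Bool) (out : String) : Prop := out = convertToMockingCase_alt charArray startUpper
instance (charArray : List String) (startUpper : Bool) (out : String) : Decidable (Spec_convertToMockingCase charArray startUpper out) := by unfold Spec_convertToMockingCase; infer_instance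

-- ===== CLAIM (what is proved, stated in full; the proofs are below) =====
def Claim_equal_convertToMockingCase : Prop := ∀ (charArray : List String) (startUpper : Bool), Dom_convertToMockingCase charArray startUpper → Spec_convertToMockingCase charArray startUpper (convertToMockingCase charArray startUpper)

-- ===== LEMMAS AND PROOFS =====

-- proof-side: the non-space positions of ls when indexing starts at s
def posFrom (s : Int) : List String → List Int
  | [] => []
  | c :: cs => if c ≠ " " then s :: posFrom (s+1) cs else posFrom (s+1) cs

-- proof-side: the chosen positions as a function of the remaining toggle state
def chosenFrom (flop : Bool) (s : Int) (ls : List String) : List Int :=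
  if flop then everyOther (posFrom s ls) else everyOther (posFrom s ls).tail

theorem positions_eq_posFrom (ls : List String) (s : Int) :
    ((PySem.List.enumerate ls s).filter (fun p => p.2 ≠ " ")).map (fun p => p.1) = posFrom s ls := by
  induction ls generalizing s with
  | nil => simp [PySem.List.enumerate_nil, posFrom]
  | cons c cs ih =>
    have ih' := ih (s+1)
    simp only [ne_eq, decide_not] at ih' ⊢
    rw [PySem.List.enumerate_cons, List.filter_cons]
    by_cases h : c = " "
    · simp only [posFrom, h, if_neg (by simp : ¬(" " : String) ≠ " ")]
      simpa [h] using ih'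
    · simp only [posFrom, if_pos h]
      simp [h, ih']

theorem mem_posFrom_ge {i s : Int} {ls : List String} (h : i ∈ posFrom s ls) : s ≤ i := by
  induction ls generalizing s with
  | nil => simp [posFrom] at h
  | cons c cs ih =>
    simp only [posFrom] at h
    split at h
    · rcases List.mem_cons.mp h with rfl | h'
      · exact le_refl _
      · have := ih h'; omega
    · have := ih h; omega

theorem everyOther_subset {x : Int} {xs : List Int} (h : x ∈ everyOther xs) : x ∈ xs := by
  induction xs using everyOther.induct with
  | case1 => simp [everyOther] at h
  | case2 y => simpa [everyOther] using h
  | case3 y z zs ih =>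
    simp only [everyOther, List.mem_cons] at h ⊢
    rcases h with rfl | h'
    · exact Or.inl rfl
    · exact Or.inr (Or.inr (ih h'))

theorem everyOther_cons (x : Int) (xs : List Int) :
    everyOther (x :: xs) = x :: everyOther xs.tail := by
  cases xs <;> simp [everyOther]

theorem mem_chosenFrom_ge {i s : Int} {flop : Bool} {ls : List String}
    (h : i ∈ chosenFrom flop s ls) : s ≤ i := by
  unfold chosenFrom at h
  split at h
  · exact mem_posFrom_ge (everyOther_subset h)
  · exact mem_posFrom_ge (List.mem_of_mem_tail (everyOther_subset h))

theorem chosenFrom_cons_nonspace_true (s : Int) (c : String) (cs : List String) (h : c ≠ " ") :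
    chosenFrom true s (c :: cs) = s :: chosenFrom false (s+1) cs := by
  simp only [chosenFrom, posFrom, if_pos h, everyOther_cons]
  simp

theorem chosenFrom_cons_nonspace_false (s : Int) (c : String) (cs : List String) (h : c ≠ " ") :
    chosenFrom false s (c :: cs) = chosenFrom true (s+1) cs := by
  simp only [chosenFrom, posFrom, if_pos h, everyOther_cons]
  simp

theorem chosenFrom_cons_space (flop : Bool) (s : Int) (cs : List String) :
    chosenFrom flop s (" " :: cs) = chosenFrom flop (s+1) cs := by
  simp [chosenFrom, posFrom]

theorem mem_enum_fst_ge {s : Int} {p : Int × String} {ls : List String}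
    (h : p ∈ PySem.List.enumerate ls s) : s ≤ p.1 := by
  rcases (PySem.List.mem_enumerate_iff _ _ _).mp h with ⟨k, hk, rfl⟩
  simp

theorem loopA_eq_map_chosen (ls : List String) (flop : Bool) (s : Int) :
    loopA ls flop = (PySem.List.enumerate ls s).map
      (fun p => if p.1 ∈ chosenFrom flop s ls then PySem.Str.upper p.2 else p.2) := by
  induction ls generalizing flop s with
  | nil => simp [loopA, PySem.List.enumerate_nil]
  | cons c cs ih =>
    rw [PySem.List.enumerate_cons, List.map_cons]
    by_cases hc : c = " "
    · subst hc
      rw [loopA, if_neg (by simp), chosenFrom_cons_space]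
      have hs : (s : Int) ∉ chosenFrom flop (s+1) cs := fun h => by
        have := mem_chosenFrom_ge h; omega
      rw [if_neg hs, ih flop (s+1)]
    · cases flop with
      | true =>
        rw [loopA, if_pos hc, chosenFrom_cons_nonspace_true s c cs hc, Bool.not_true,
          if_pos rfl, if_pos (List.mem_cons_self ..)]
        congr 1
        rw [ih false (s+1)]
        apply List.map_congr_left
        intro p hp
        have hp1 : s + 1 ≤ p.1 := mem_enum_fst_ge hp
        have hiff : (p.1 ∈ s :: chosenFrom false (s+1) cs) ↔ p.1 ∈ chosenFrom false (s+1) cs := by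
          simp only [List.mem_cons]
          constructor
          · rintro (h | h)
            · omega
            · exact h
          · exact Or.inr
        simp only [hiff]
      | false =>
        rw [loopA, if_pos hc, chosenFrom_cons_nonspace_false s c cs hc, Bool.not_false]
        have hs : (s : Int) ∉ chosenFrom true (s+1) cs := fun h => by
          have := mem_chosenFrom_ge h; omega
        rw [if_neg (by simp), if_neg hs]
        congr 1
        exact ih true (s+1)

-- ===== VERDICT (by name: the statement is the Claim_ definition above) =====
theorem convertToMockingCase_spec : Claim_equal_convertToMockingCase := by
  intro charArray startUpper _
  unfold Spec_convertToMockingCase convertToMockingCase convertToMockingCase_alt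
  rw [positions_eq_posFrom charArray 0]
  congr 1
  rw [loopA_eq_map_chosen charArray startUpper 0]
  apply List.map_congr_left
  intro p _
  cases startUpper <;> simp [chosenFrom]
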